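-- pv_equiv track=rewrite | github.com/Rhaegal222/Unical | Primo Anno/Fondamenti di Programmazione 1/Esercizi/Old/NO domjudge/pari_dispari.py | scansiona_lista_dispari
-- ===== SOURCE A (Python) =====
-- def scansiona_lista_dispari(lista, i, status):
--     if i == len(lista)-1:
--         return status
--     if i % 2 == 0:
--         if (lista[i] + lista[i+1])%2 != 0:
--             return scansiona_lista_dispari(lista, i+1, True)
--         else:
--             status = False
--             return status
--     else:
--         if (lista[i] + lista[i+1])%2 == 0:
--             return scansiona_lista_dispari(lista, i+1, True)
--         else:
--             status = False
--             return status
-- ===== SOURCE B (Python) =====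
-- def scansiona_lista_dispari(lista, i, status):
--     if i == len(lista) - 1:
--         return status
--     return all((lista[j] + lista[j + 1] + j) % 2 == 1 for j in range(i, len(lista) - 1))
-- ===== Notes on version B (the rewrite author's own statement) =====
-- stated objective: simpler
-- what changed: Replaced the status-threading recursion by a single closed-form all() over range(i, len-1) of one merged parity condition (sum+index odd), with the base case kept.
import Mathlib
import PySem

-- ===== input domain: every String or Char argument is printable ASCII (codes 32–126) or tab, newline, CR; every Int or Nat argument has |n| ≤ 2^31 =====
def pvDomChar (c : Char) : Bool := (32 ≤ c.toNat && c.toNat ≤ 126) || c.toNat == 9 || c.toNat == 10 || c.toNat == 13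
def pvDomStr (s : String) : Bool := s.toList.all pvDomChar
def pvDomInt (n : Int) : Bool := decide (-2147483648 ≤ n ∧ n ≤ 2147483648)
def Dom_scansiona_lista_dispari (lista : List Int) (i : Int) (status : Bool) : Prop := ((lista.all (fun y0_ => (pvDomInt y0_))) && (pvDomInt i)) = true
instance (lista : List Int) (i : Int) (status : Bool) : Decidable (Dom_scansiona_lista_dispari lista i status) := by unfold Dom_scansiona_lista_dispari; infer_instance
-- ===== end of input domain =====

-- B replaces A's status-threading recursion by one closed-form check over range(i, len-1); objective: simpler.

-- ===== PORT A =====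
def scansiona_lista_dispari (lista : List Int) (i : Int) (status : Bool) : Bool :=
  if i = (lista.length : Int) - 1 then status
  else
    match h1 : PySem.List.pyGet? lista i, h2 : PySem.List.pyGet? lista (i + 1) with
    | some a, some b =>
      if PySem.Int.mod i 2 = 0 then
        if PySem.Int.mod (a + b) 2 ≠ 0 then scansiona_lista_dispari lista (i + 1) true
        else false
      else
        if PySem.Int.mod (a + b) 2 = 0 then scansiona_lista_dispari lista (i + 1) true
        else false
    | _, _ => false  -- Python raises IndexError here; excluded by Pre_
termination_by ((lista.length : Int) - 1 - i).toNat
decreasing_by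
  all_goals
    have hin : PySem.Raise.InRange lista.length i := by
      by_contra hc
      rw [← PySem.List.pyGet?_eq_none_iff] at hc
      simp [hc] at h1
    unfold PySem.Raise.InRange at hin
    omega

-- ===== PORT B =====
def scansiona_lista_dispari_alt (lista : List Int) (i : Int) (status : Bool) : Bool :=
  if i = (lista.length : Int) - 1 then status
  else
    (PySem.List.pyRange i ((lista.length : Int) - 1) 1).all
      (fun j =>
        PySem.Int.mod (PySem.List.pyGetD lista j 0 + PySem.List.pyGetD lista (j + 1) 0 + j) 2 == 1)

-- ===== PRECONDITION & SPEC =====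
-- Pre_ = exactly the inputs where Python A returns (elsewhere lista[i] raises IndexError).
def Pre_scansiona_lista_dispari (lista : List Int) (i : Int) (status : Bool) : Prop :=
  (-(lista.length : Int) ≤ i ∧ i ≤ (lista.length : Int) - 1) ∨ (lista = [] ∧ i = -1)
instance (lista : List Int) (i : Int) (status : Bool) : Decidable (Pre_scansiona_lista_dispari lista i status) := by unfold Pre_scansiona_lista_dispari; infer_instance
def pvWitness_scansiona_lista_dispari : List Int × Int × Bool := ([1, 2, 2], 0, false)

def Spec_scansiona_lista_dispari (lista : List Int) (i : Int) (status : Bool) (out : Bool) : Prop := out = scansiona_lista_dispari_alt lista i status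
instance (lista : List Int) (i : Int) (status : Bool) (out : Bool) : Decidable (Spec_scansiona_lista_dispari lista i status out) := by unfold Spec_scansiona_lista_dispari; infer_instance

-- ===== CLAIM (what is proved, stated in full; the proofs are below) =====
def Claim_equal_scansiona_lista_dispari : Prop := ∀ (lista : List Int) (i : Int) (status : Bool), Dom_scansiona_lista_dispari lista i status → Pre_scansiona_lista_dispari lista i status → Spec_scansiona_lista_dispari lista i status (scansiona_lista_dispari lista i status)

-- ===== LEMMAS AND PROOFS =====

-- The merged parity condition of B, as a function of the two fetched elements and the index.
lemma pv_cond_split (a b i : Int) :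
    (PySem.Int.mod (a + b + i) 2 == 1) =
      (if PySem.Int.mod i 2 = 0 then decide (PySem.Int.mod (a + b) 2 ≠ 0)
       else decide (PySem.Int.mod (a + b) 2 = 0)) := by
  rw [PySem.Int.mod_eq_emod_of_pos (a := a + b + i) (by norm_num),
      PySem.Int.mod_eq_emod_of_pos (a := i) (by norm_num),
      PySem.Int.mod_eq_emod_of_pos (a := a + b) (by norm_num)]
  split_ifs with h <;>
    (rw [Bool.eq_iff_iff]; simp only [beq_iff_eq, decide_eq_true_eq]; omega)

-- B restarted at i+1 with status true equals the tail of B's all-scan.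
lemma pv_alt_tail (lista : List Int) (i : Int)
    (h : i + 1 ≤ (lista.length : Int) - 1) :
    scansiona_lista_dispari_alt lista (i + 1) true =
      (PySem.List.pyRange (i + 1) ((lista.length : Int) - 1) 1).all
        (fun j =>
          PySem.Int.mod (PySem.List.pyGetD lista j 0 + PySem.List.pyGetD lista (j + 1) 0 + j) 2 == 1) := by
  unfold scansiona_lista_dispari_alt
  split_ifs with hb
  · rw [hb, PySem.List.pyRange_one_eq_nil (by omega)]
    simp
  · rfl

lemma pv_main (lista : List Int) (i : Int) (status : Bool)
    (hlo : -(lista.length : Int) ≤ i) (hhi : i ≤ (lista.length : Int) - 1) :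
    scansiona_lista_dispari lista i status = scansiona_lista_dispari_alt lista i status := by
  by_cases hb : i = (lista.length : Int) - 1
  · unfold scansiona_lista_dispari scansiona_lista_dispari_alt
    simp [hb]
  · have hlt : i < (lista.length : Int) - 1 := lt_of_le_of_ne hhi hb
    -- both indices are in range
    have hin1 : PySem.Raise.InRange lista.length i := by
      unfold PySem.Raise.InRange; omega
    have hin2 : PySem.Raise.InRange lista.length (i + 1) := by
      unfold PySem.Raise.InRange; omega
    obtain ⟨a, ha⟩ : ∃ a, PySem.List.pyGet? lista i = some a := by
      cases hx : PySem.List.pyGet? lista i with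
      | none => exact absurd hin1 ((PySem.List.pyGet?_eq_none_iff lista i).mp hx)
      | some a => exact ⟨a, rfl⟩
    obtain ⟨b, hbv⟩ : ∃ b, PySem.List.pyGet? lista (i + 1) = some b := by
      cases hx : PySem.List.pyGet? lista (i + 1) with
      | none => exact absurd hin2 ((PySem.List.pyGet?_eq_none_iff lista (i + 1)).mp hx)
      | some b => exact ⟨b, rfl⟩
    have hda : PySem.List.pyGetD lista i 0 = a := by
      simp [PySem.List.pyGetD, ha]
    have hdb : PySem.List.pyGetD lista (i + 1) 0 = b := by
      simp [PySem.List.pyGetD, hbv]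
    have hrec : scansiona_lista_dispari lista (i + 1) true =
        scansiona_lista_dispari_alt lista (i + 1) true :=
      pv_main lista (i + 1) true (by omega) (by omega)
    -- unfold A one step
    rw [scansiona_lista_dispari]
    rw [if_neg hb]
    rw [ha, hbv]
    -- unfold B one step
    conv_rhs => rw [scansiona_lista_dispari_alt]
    rw [if_neg hb, PySem.List.pyRange_one_cons hlt]
    simp only [List.all_cons, hda, hdb]
    rw [pv_cond_split a b i, ← pv_alt_tail lista i (by omega), ← hrec]
    split_ifs with h1 h2 h3 <;> simp_all
termination_by ((lista.length : Int) - 1 - i).toNat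
decreasing_by omega

-- ===== VERDICT (by name: the statement is the Claim_ definition above) =====
theorem scansiona_lista_dispari_spec : Claim_equal_scansiona_lista_dispari := by
  intro lista i status _ hpre
  unfold Spec_scansiona_lista_dispari
  rcases hpre with ⟨hlo, hhi⟩ | ⟨hnil, hi⟩
  · exact pv_main lista i status hlo hhi
  · subst hnil hi
    unfold scansiona_lista_dispari scansiona_lista_dispari_alt
    norm_num
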